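-- pv_equiv track=rewrite | github.com/Maurdekye/Misc-Projects | Python/CMD scripts/brainfuck transcriber.py | nestsubloops
-- ===== SOURCE A (Python) =====
-- def nestsubloops(lengths):
--     if len(lengths) == 1:
--         return "-"*int(lengths[0])
--     s = len(lengths)-1
--     fin = ">"*s
--     for n in lengths[:-1]:
--         fin += "+"*n + "[<"
--     fin += "-"*int(lengths[-1])
--     fin += ">-]"*s
--     fin += "<"*s
--     return fin
-- ===== SOURCE B (Python) =====
-- def nestsubloops(lengths):
--     # Inside-out: start from the innermost '-' core and wrap one complete
--     # nesting level ("+"*n + "[<" ... ">-]") around it per step, outermost last.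
--     *prefix, last = lengths
--     body = "-" * int(last)
--     for n in reversed(prefix):
--         body = "+" * n + "[<" + body + ">-]"
--     return ">" * len(prefix) + body + "<" * len(prefix)
-- ===== Notes on version B (the rewrite author's own statement) =====
-- stated objective: alternative
-- what changed: Replaces A's flat left-to-right accumulator (prefix pass appending open-pieces, then a string-multiplied run of closers, with a one-element special case) by an inside-out construction that starts from the innermost '-' core and wraps one complete matched nesting level around it per step, with no special case and no multiplied closer run.
import Mathlib
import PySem

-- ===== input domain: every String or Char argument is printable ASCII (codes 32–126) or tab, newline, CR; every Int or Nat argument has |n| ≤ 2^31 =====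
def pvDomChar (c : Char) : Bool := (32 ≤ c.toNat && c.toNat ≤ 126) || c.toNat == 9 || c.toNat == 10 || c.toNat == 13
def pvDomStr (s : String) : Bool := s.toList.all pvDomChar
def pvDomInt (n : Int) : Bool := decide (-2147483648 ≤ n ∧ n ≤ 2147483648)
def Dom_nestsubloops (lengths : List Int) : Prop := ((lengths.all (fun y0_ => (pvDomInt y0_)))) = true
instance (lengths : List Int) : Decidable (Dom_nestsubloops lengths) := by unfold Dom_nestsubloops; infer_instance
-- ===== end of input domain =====

-- B replaces A's flat accumulator loop by an inside-out construction wrapping one nesting level per step (alternative decomposition).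
-- "-"*n (string times int; negative gives "")
def repC (c : Char) (n : Int) : List Char := PySem.List.pyRepeat [c] n

-- ===== PORT A =====
def nestsubloops (lengths : List Int) : String :=
  if lengths.length = 1 then
    -- lengths[0]; the index is valid in this branch, so getD's default is never used
    String.ofList (repC '-' ((PySem.List.pyGet? lengths 0).getD 0))
  else
    let s : Int := (lengths.length : Int) - 1
    let fin := repC '>' s
    let fin := (PySem.List.slice lengths none (some (-1))).foldl
      (fun acc n => acc ++ (repC '+' n ++ ['[', '<'])) fin
    -- lengths[-1]; valid whenever lengths ≠ [] (Pre_), so getD's default is never used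
    let fin := fin ++ repC '-' ((PySem.List.pyGet? lengths (-1)).getD 0)
    let fin := fin ++ PySem.List.pyRepeat ['>', '-', ']'] s
    let fin := fin ++ repC '<' s
    String.ofList fin

-- ===== PORT B =====
def nestsubloops_alt (lengths : List Int) : String :=
  -- "*pfx, last = lengths" (raises ValueError on [], excluded by Pre_; getD's default unused)
  let pfx := lengths.dropLast
  let last := lengths.getLast?.getD 0
  let body := pfx.reverse.foldl
    (fun b n => repC '+' n ++ ['[', '<'] ++ b ++ ['>', '-', ']'])
    (repC '-' last)
  String.ofList (repC '>' (pfx.length : Int) ++ body ++ repC '<' (pfx.length : Int))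

-- ===== PRECONDITION & SPEC =====
-- A raises IndexError (lengths[-1]) on the empty list, so it is excluded.
def Pre_nestsubloops (lengths : List Int) : Prop := lengths ≠ []
instance (lengths : List Int) : Decidable (Pre_nestsubloops lengths) := by unfold Pre_nestsubloops; infer_instance
def pvWitness_nestsubloops : List Int := ([3, -2, 4])

def Spec_nestsubloops (lengths : List Int) (out : String) : Prop := out = nestsubloops_alt lengths
instance (lengths : List Int) (out : String) : Decidable (Spec_nestsubloops lengths out) := by unfold Spec_nestsubloops; infer_instance

-- ===== CLAIM (what is proved, stated in full; the proofs are below) =====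
def Claim_equal_nestsubloops : Prop := ∀ (lengths : List Int), Dom_nestsubloops lengths → Pre_nestsubloops lengths → Spec_nestsubloops lengths (nestsubloops lengths)

-- ===== LEMMAS AND PROOFS =====

-- B's inside-out wrap, flattened: all open-pieces, the core, then the closers.
theorem wrap_eq (p : List Int) (core : List Char) :
    p.reverse.foldl
      (fun b n => repC '+' n ++ ['[', '<'] ++ b ++ ['>', '-', ']']) core
    = (p.map (fun k => repC '+' k ++ ['[', '<'])).flatten
      ++ core ++ (List.replicate p.length (['>', '-', ']'] : List Char)).flatten := by
  induction p with
  | nil => simp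
  | cons a p' ih =>
      rw [List.reverse_cons, List.foldl_append, ih]
      simp [List.replicate_succ' (n := p'.length), List.append_assoc]

theorem pyGet_neg_one_getLast (t : List Int) (n : Int) :
    (PySem.List.pyGet? (n :: t) (-1)).getD 0 = (n :: t).getLast?.getD 0 := by
  simp [PySem.List.pyGet?, PySem.List.pyIdx?, List.getLast?_eq_getElem?]

theorem nestsubloops_spec_aux (lengths : List Int) (h : lengths ≠ []) :
    nestsubloops lengths = nestsubloops_alt lengths := by
  obtain ⟨n, t, rfl⟩ : ∃ n t, lengths = n :: t := by
    cases lengths with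
    | nil => exact absurd rfl h
    | cons a t => exact ⟨a, t, rfl⟩
  by_cases h1 : (n :: t).length = 1
  · obtain rfl : t = [] := by simpa using h1
    simp [nestsubloops, nestsubloops_alt, repC, PySem.List.pyRepeat,
      PySem.List.pyGet?, PySem.List.pyIdx?]
  · have hrep : PySem.List.pyRepeat (['>', '-', ']'] : List Char) (((n :: t).length : Int) - 1)
        = (List.replicate t.length (['>', '-', ']'] : List Char)).flatten := by
      simp [PySem.List.pyRepeat]
    have hs : (((n :: t).length : Int) - 1) = (((n :: t).dropLast.length : Nat) : Int) := by
      simp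
    simp only [nestsubloops, nestsubloops_alt, h1, if_false]
    rw [PySem.List.slice_to_neg_one, PySem.List.foldl_append_eq_flatMap,
        hrep, wrap_eq, pyGet_neg_one_getLast, hs]
    simp [List.flatMap_def, List.append_assoc]

-- ===== VERDICT (by name: the statement is the Claim_ definition above) =====
theorem nestsubloops_spec : Claim_equal_nestsubloops := by
  intro lengths _ hpre
  exact nestsubloops_spec_aux lengths hpre
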